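-- pv_equiv track=rewrite | github.com/cola0405/usaco | bronze/22-1/2-detailOptimize.py | check
-- ===== SOURCE A (Python) =====
-- def check(d1, d2):
--     countWin = countLose = 0
--     for num1 in d1:
--         for num2 in d2:
--             if num1 > num2:
--                 countWin += 1
--             elif num1 < num2:
--                 countLose += 1
--     return countWin, countLose
-- ===== SOURCE B (Python) =====
-- def _bisect_left(s, x):
--     lo, hi = 0, len(s)
--     while lo < hi:
--         mid = (lo + hi) // 2
--         if s[mid] < x:
--             lo = mid + 1
--         else:
--             hi = mid
--     return lo
--
--
-- def _bisect_right(s, x):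
--     lo, hi = 0, len(s)
--     while lo < hi:
--         mid = (lo + hi) // 2
--         if s[mid] <= x:
--             lo = mid + 1
--         else:
--             hi = mid
--     return lo
--
--
-- def check(d1, d2):
--     s = sorted(d2)
--     m = len(s)
--     win = lose = 0
--     for x in d1:
--         win += _bisect_left(s, x)
--         lose += m - _bisect_right(s, x)
--     return win, lose
-- ===== Notes on version B (the rewrite author's own statement) =====
-- stated objective: faster
-- what changed: B sorts d2 once and, for each element of d1, binary-searches the sorted list to count smaller/larger elements, replacing A's nested scan over d2.
import Mathlib
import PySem

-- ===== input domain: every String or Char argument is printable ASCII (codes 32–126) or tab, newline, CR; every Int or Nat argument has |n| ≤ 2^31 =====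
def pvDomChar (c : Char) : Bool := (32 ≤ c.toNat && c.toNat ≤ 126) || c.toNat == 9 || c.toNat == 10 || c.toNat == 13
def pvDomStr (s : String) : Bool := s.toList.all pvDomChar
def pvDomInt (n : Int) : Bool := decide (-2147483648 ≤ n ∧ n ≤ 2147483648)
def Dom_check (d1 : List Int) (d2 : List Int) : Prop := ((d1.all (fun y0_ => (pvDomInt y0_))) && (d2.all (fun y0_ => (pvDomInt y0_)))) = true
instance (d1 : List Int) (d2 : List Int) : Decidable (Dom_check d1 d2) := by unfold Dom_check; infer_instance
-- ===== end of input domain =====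

-- B sorts d2 once and binary-searches it per element of d1 instead of A's nested scan (faster in a timing run).


-- ===== PORT A =====
def check (d1 : List Int) (d2 : List Int) : Int × Int :=
  d1.foldl (fun acc num1 =>
    d2.foldl (fun acc2 num2 =>
      if num1 > num2 then (acc2.1 + 1, acc2.2)
      else if num1 < num2 then (acc2.1, acc2.2 + 1)
      else acc2) acc) (0, 0)

-- ===== PORT B =====
-- Source B's hand-written _bisect_left/_bisect_right are exactly the standard bisect loops,
-- ported as the PySem primitives PySem.List.bisectLeft / bisectRight (the same lo/hi loop).
def check_alt (d1 : List Int) (d2 : List Int) : Int × Int :=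
  let s := PySem.List.sorted d2 (fun v => v) false
  let m : Int := s.length
  d1.foldl (fun acc x =>
    (acc.1 + (PySem.List.bisectLeft s x : Int),
     acc.2 + (m - (PySem.List.bisectRight s x : Int)))) (0, 0)

-- ===== PRECONDITION & SPEC =====
def Spec_check (d1 : List Int) (d2 : List Int) (out : Int × Int) : Prop := out = check_alt d1 d2
instance (d1 : List Int) (d2 : List Int) (out : Int × Int) : Decidable (Spec_check d1 d2 out) := by unfold Spec_check; infer_instance

-- ===== CLAIM (what is proved, stated in full; the proofs are below) =====
def Claim_equal_check : Prop := ∀ (d1 : List Int) (d2 : List Int), Dom_check d1 d2 → Spec_check d1 d2 (check d1 d2)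

-- ===== LEMMAS AND PROOFS =====

-- a countP pinned by an index threshold: everything before position k satisfies p, nothing from k on
theorem countP_eq_of_threshold (s : List Int) (p : Int → Bool) (k : Nat)
    (hk : k ≤ s.length)
    (h1 : ∀ (j : Nat) (hj : j < s.length), j < k → p s[j])
    (h2 : ∀ (j : Nat) (hj : j < s.length), k ≤ j → ¬ p s[j]) :
    s.countP p = k := by
  have hsplit : s = s.take k ++ s.drop k := (List.take_append_drop k s).symm
  have htake : (s.take k).countP p = (s.take k).length := by
    apply List.countP_eq_length.2
    intro a ha
    obtain ⟨i, hi, hieq⟩ := List.mem_iff_getElem.1 ha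
    have hlen : (s.take k).length = k := by
      simp [List.length_take, Nat.min_eq_left hk]
    have hik : i < k := by omega
    have his : i < s.length := by omega
    have : (s.take k)[i] = s[i] := List.getElem_take
    rw [this] at hieq
    rw [← hieq]; exact h1 i his hik
  have hdrop : (s.drop k).countP p = 0 := by
    apply List.countP_eq_zero.2
    intro a ha
    obtain ⟨i, hi, hieq⟩ := List.mem_iff_getElem.1 ha
    have hlen : (s.drop k).length = s.length - k := by simp
    have his : k + i < s.length := by omega
    have : (s.drop k)[i] = s[k + i] := by
      simp [List.getElem_drop]
    rw [this] at hieq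
    rw [← hieq]; exact h2 (k + i) his (Nat.le_add_right k i)
  calc s.countP p = (s.take k ++ s.drop k).countP p := by rw [← hsplit]
    _ = (s.take k).countP p + (s.drop k).countP p := List.countP_append ..
    _ = k := by rw [htake, hdrop, List.length_take, Nat.min_eq_left hk]; omega

theorem bisectLeft_eq_countP (s : List Int) (x : Int)
    (hs : List.Pairwise (· ≤ ·) s) :
    PySem.List.bisectLeft s x = s.countP (fun y => decide (y < x)) := by
  obtain ⟨hle, h1, h2⟩ := PySem.List.bisectLeft_spec s x hs
  refine (countP_eq_of_threshold s _ _ hle ?_ ?_).symm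
  · intro j hj hjk; simpa using h1 j hj hjk
  · intro j hj hkj; simpa using h2 j hj hkj

theorem bisectRight_eq_countP (s : List Int) (x : Int)
    (hs : List.Pairwise (· ≤ ·) s) :
    PySem.List.bisectRight s x = s.countP (fun y => decide (y ≤ x)) := by
  obtain ⟨hle, h1, h2⟩ := PySem.List.bisectRight_spec s x hs
  refine (countP_eq_of_threshold s _ _ hle ?_ ?_).symm
  · intro j hj hjk; simpa using h1 j hj hjk
  · intro j hj hkj; simp only [decide_eq_true_eq, not_le]; exact h2 j hj hkj

theorem countP_le_add_lt (s : List Int) (x : Int) :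
    s.countP (fun y => decide (y ≤ x)) + s.countP (fun y => decide (x < y)) = s.length := by
  induction s with
  | nil => simp
  | cons a t ih =>
    by_cases h : a ≤ x
    · simp [h, not_lt.2 h]; omega
    · have hx : x < a := not_le.1 h
      simp [h, hx]; omega

-- closed form of A's inner loop over d2
theorem inner_loop_eq (x : Int) (d2 : List Int) (a b : Int) :
    d2.foldl (fun acc2 num2 =>
      if x > num2 then (acc2.1 + 1, acc2.2)
      else if x < num2 then (acc2.1, acc2.2 + 1)
      else acc2) (a, b)
    = (a + (d2.countP (fun y => decide (y < x)) : Int),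
       b + (d2.countP (fun y => decide (x < y)) : Int)) := by
  induction d2 generalizing a b with
  | nil => simp
  | cons h t ih =>
    by_cases h1 : h < x
    · simp [List.foldl_cons, h1, not_lt.2 (le_of_lt h1), ih]
      omega
    · by_cases h2 : x < h
      · simp [List.foldl_cons, h1, h2, ih]
        omega
      · simp [List.foldl_cons, h1, h2, ih]

-- per-element agreement of the two step functions
theorem step_eq (x : Int) (d2 : List Int) (acc : Int × Int) :
    d2.foldl (fun acc2 num2 =>
      if x > num2 then (acc2.1 + 1, acc2.2)
      else if x < num2 then (acc2.1, acc2.2 + 1)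
      else acc2) acc
    = (acc.1 + (PySem.List.bisectLeft (PySem.List.sorted d2 (fun v => v) false) x : Int),
       acc.2 + (((PySem.List.sorted d2 (fun v => v) false).length : Int)
                 - (PySem.List.bisectRight (PySem.List.sorted d2 (fun v => v) false) x : Int))) := by
  set s := PySem.List.sorted d2 (fun v => v) false with hsdef
  have hperm : s.Perm d2 := PySem.List.sorted_perm ..
  have hpw : List.Pairwise (· ≤ ·) s := PySem.List.sorted_pairwise ..
  obtain ⟨a, b⟩ := acc
  rw [inner_loop_eq]
  have hwin : d2.countP (fun y => decide (y < x)) = PySem.List.bisectLeft s x := by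
    rw [bisectLeft_eq_countP s x hpw, hperm.countP_eq]
  have hlose : (d2.countP (fun y => decide (x < y)) : Int)
      = (s.length : Int) - (PySem.List.bisectRight s x : Int) := by
    rw [bisectRight_eq_countP s x hpw, ← hperm.countP_eq (fun y => decide (x < y))]
    have := countP_le_add_lt s x
    omega
  rw [hwin, hlose]

theorem fold_eq (d2 : List Int) (t : List Int) (acc : Int × Int) :
    t.foldl (fun acc num1 =>
      d2.foldl (fun acc2 num2 =>
        if num1 > num2 then (acc2.1 + 1, acc2.2)
        else if num1 < num2 then (acc2.1, acc2.2 + 1)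
        else acc2) acc) acc
    = t.foldl (fun acc x =>
        (acc.1 + (PySem.List.bisectLeft (PySem.List.sorted d2 (fun v => v) false) x : Int),
         acc.2 + (((PySem.List.sorted d2 (fun v => v) false).length : Int)
                   - (PySem.List.bisectRight (PySem.List.sorted d2 (fun v => v) false) x : Int)))) acc := by
  induction t generalizing acc with
  | nil => rfl
  | cons h t ih =>
    simp only [List.foldl_cons]
    rw [step_eq h d2 acc]
    exact ih _

theorem check_eq_check_alt (d1 d2 : List Int) : check d1 d2 = check_alt d1 d2 := by
  unfold check check_alt
  exact fold_eq d2 d1 (0, 0)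

-- ===== VERDICT (by name: the statement is the Claim_ definition above) =====
theorem check_spec : Claim_equal_check := by
  intro d1 d2 _
  unfold Spec_check
  exact check_eq_check_alt d1 d2
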